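-- pv_equiv track=rewrite | github.com/jylee425/algorithm_exercises | dq_1030.py | is_one
-- ===== SOURCE A (Python) =====
-- def is_one(r, c, s, N, K):
--     s = s - 1
--
--     if N%2 == 0: mid = (N-K)//2
--     else: mid = (N-K+1)//2
--
--     if s <= 0 :
--         res_r = r % N
--         res_c = c % N
--
--         if( (res_r+1 > mid) and (res_r+1 <= mid+K) ) :
--                 if( (res_c+1 > mid) and (res_c+1 <= mid+K) ) :
--                     return 1
--         return 0
--     else :
--         res_r = r // (N**s)
--         res_c = c // (N**s)
--
--         if( (res_r+1 > mid) and (res_r+1 <= mid+K) ) :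
--                 if( (res_c+1 > mid) and (res_c+1 <= mid+K) ) :
--                     return 1
--         return is_one(r % (N**s), c % (N**s), s, N, K)
-- ===== SOURCE B (Python) =====
-- def is_one(r, c, s, N, K):
--     mid = (N - K) // 2 if N % 2 == 0 else (N - K + 1) // 2
--     levels = max(s - 1, 0)
--     p = N ** levels
--     for _ in range(levels):
--         dr, dc = r // p, c // p
--         if mid < dr + 1 <= mid + K and mid < dc + 1 <= mid + K:
--             return 1
--         r, c = r % p, c % p
--         p //= N
--     dr, dc = r % N, c % N
--     return 1 if mid < dr + 1 <= mid + K and mid < dc + 1 <= mid + K else 0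
-- ===== Notes on version B (the rewrite author's own statement) =====
-- stated objective: alternative
-- what changed: Replaced the recursion that recomputes N**s from scratch at every level with a single iterative MSB-first scan over the digit levels that computes the top power once and divides it down by N each step (same early exit).
import Mathlib
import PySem

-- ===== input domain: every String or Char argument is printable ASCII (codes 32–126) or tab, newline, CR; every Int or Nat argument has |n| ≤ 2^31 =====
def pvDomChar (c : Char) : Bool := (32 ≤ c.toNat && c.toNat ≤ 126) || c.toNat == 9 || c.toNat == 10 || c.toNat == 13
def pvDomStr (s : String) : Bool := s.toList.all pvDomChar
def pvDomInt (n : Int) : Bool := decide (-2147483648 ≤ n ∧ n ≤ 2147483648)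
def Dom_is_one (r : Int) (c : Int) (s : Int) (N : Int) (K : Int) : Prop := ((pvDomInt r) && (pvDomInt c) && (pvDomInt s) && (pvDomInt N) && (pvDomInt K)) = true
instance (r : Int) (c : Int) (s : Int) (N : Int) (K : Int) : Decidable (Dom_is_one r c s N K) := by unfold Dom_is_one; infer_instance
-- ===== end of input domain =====

-- B replaces A's recursion (which recomputes N**s at every level) with one loop over the
-- base-N digit levels, computing the top power once and dividing it down (objective: alternative).


-- ===== PORT A =====
def is_one (r : Int) (c : Int) (s : Int) (N : Int) (K : Int) : Int :=
  let s' := s - 1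
  let mid := if PySem.Int.mod N 2 = 0 then PySem.Int.floordiv (N - K) 2
             else PySem.Int.floordiv (N - K + 1) 2
  if hbase : s' ≤ 0 then
    let res_r := PySem.Int.mod r N
    let res_c := PySem.Int.mod c N
    -- nested Python ifs with fall-through: return 1 only when both hold, else fall to return 0
    if res_r + 1 > mid ∧ res_r + 1 ≤ mid + K ∧ res_c + 1 > mid ∧ res_c + 1 ≤ mid + K then 1
    else 0
  else
    let p := N ^ s'.toNat
    let res_r := PySem.Int.floordiv r p
    let res_c := PySem.Int.floordiv c p
    -- nested Python ifs with fall-through: return 1 only when both hold, else fall to the recursion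
    if res_r + 1 > mid ∧ res_r + 1 ≤ mid + K ∧ res_c + 1 > mid ∧ res_c + 1 ≤ mid + K then 1
    else is_one (PySem.Int.mod r p) (PySem.Int.mod c p) s' N K
termination_by (s - 1).toNat
decreasing_by omega

-- ===== PORT B =====
-- the for-loop of Source B (fuel = remaining iterations); fuel 0 is the code after the loop
def isOneLoop (fuel : Nat) (r c p mid N K : Int) : Int :=
  match fuel with
  | 0 =>
    let dr := PySem.Int.mod r N
    let dc := PySem.Int.mod c N
    if mid < dr + 1 ∧ dr + 1 ≤ mid + K ∧ mid < dc + 1 ∧ dc + 1 ≤ mid + K then 1 else 0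
  | n + 1 =>
    let dr := PySem.Int.floordiv r p
    let dc := PySem.Int.floordiv c p
    if mid < dr + 1 ∧ dr + 1 ≤ mid + K ∧ mid < dc + 1 ∧ dc + 1 ≤ mid + K then 1
    else isOneLoop n (PySem.Int.mod r p) (PySem.Int.mod c p) (PySem.Int.floordiv p N) mid N K

def is_one_alt (r : Int) (c : Int) (s : Int) (N : Int) (K : Int) : Int :=
  let mid := if PySem.Int.mod N 2 = 0 then PySem.Int.floordiv (N - K) 2
             else PySem.Int.floordiv (N - K + 1) 2
  let levels := (s - 1).toNat   -- max(s - 1, 0)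
  isOneLoop levels r c (N ^ levels) mid N K

-- ===== PRECONDITION & SPEC =====
-- A raises ZeroDivisionError when N = 0 (r % N); Pre_ excludes exactly that.
def Pre_is_one (r : Int) (c : Int) (s : Int) (N : Int) (K : Int) : Prop := N ≠ 0
instance (r : Int) (c : Int) (s : Int) (N : Int) (K : Int) : Decidable (Pre_is_one r c s N K) := by unfold Pre_is_one; infer_instance
def pvWitness_is_one : Int × Int × Int × Int × Int := (5, 6, 2, 3, 1)

def Spec_is_one (r : Int) (c : Int) (s : Int) (N : Int) (K : Int) (out : Int) : Prop := out = is_one_alt r c s N K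
instance (r : Int) (c : Int) (s : Int) (N : Int) (K : Int) (out : Int) : Decidable (Spec_is_one r c s N K out) := by unfold Spec_is_one; infer_instance

-- ===== CLAIM (what is proved, stated in full; the proofs are below) =====
def Claim_equal_is_one : Prop := ∀ (r : Int) (c : Int) (s : Int) (N : Int) (K : Int), Dom_is_one r c s N K → Pre_is_one r c s N K → Spec_is_one r c s N K (is_one r c s N K)

-- ===== LEMMAS AND PROOFS =====

-- dividing the power down: N^(n+1) // N = N^n (exact division, any N ≠ 0)
theorem pow_floordiv_self (N : Int) (hN : N ≠ 0) (n : Nat) :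
    PySem.Int.floordiv (N ^ (n + 1)) N = N ^ n := by
  have h : N ^ (n + 1) = N ^ n * N := by ring
  rw [h, PySem.Int.floordiv]
  exact Int.mul_fdiv_cancel _ hN

theorem is_one_eq_loop (n : Nat) : ∀ (r c s N K : Int), N ≠ 0 → (s - 1).toNat = n →
    is_one r c s N K =
      isOneLoop n r c (N ^ n)
        (if PySem.Int.mod N 2 = 0 then PySem.Int.floordiv (N - K) 2
         else PySem.Int.floordiv (N - K + 1) 2) N K := by
  induction n with
  | zero =>
    intro r c s N K hN hs
    have hle : s - 1 ≤ 0 := by omega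
    unfold is_one
    simp only [dif_pos hle, isOneLoop]
  | succ n ih =>
    intro r c s N K hN hs
    have hpos : ¬ (s - 1 ≤ 0) := by omega
    unfold is_one
    simp only [dif_neg hpos, hs, isOneLoop, pow_floordiv_self N hN n]
    have hs' : (s - 1 - 1).toNat = n := by omega
    rw [ih _ _ (s - 1) N K hN hs']

-- ===== VERDICT (by name: the statement is the Claim_ definition above) =====
theorem is_one_spec : Claim_equal_is_one := by
  intro r c s N K _ hN
  unfold Spec_is_one is_one_alt
  exact is_one_eq_loop (s - 1).toNat r c s N K hN rfl
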